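-- pv_equiv track=rewrite | github.com/InkiiBlast225/Pycross-Teaser- | PyX T.py | findRule
-- ===== SOURCE A (Python) =====
-- def findRule(rowCol):
--     streak = 0
--     pattern = ''
--
--     for i in rowCol:
--         if i == '1':
--             streak += 1
--         if i == '0' and streak > 0:
--             pattern += str(streak)
--             streak = 0
--     if streak > 0:
--         pattern += str(streak)
--     if pattern == '':
--         pattern += '0'
--
--     return(pattern)
-- ===== SOURCE B (Python) =====
-- def findRule(rowCol):
--     counts = [seg.count('1') for seg in rowCol.split('0')]
--     pattern = ''.join(str(c) for c in counts if c > 0)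
--     return pattern if pattern else '0'
-- ===== Notes on version B (the rewrite author's own statement) =====
-- stated objective: faster
-- what changed: Replaced the stateful char-by-char streak accumulator with a tokenize pass: split the string on the zero character, count the one characters in each segment, and join the nonzero counts.
import Mathlib
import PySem

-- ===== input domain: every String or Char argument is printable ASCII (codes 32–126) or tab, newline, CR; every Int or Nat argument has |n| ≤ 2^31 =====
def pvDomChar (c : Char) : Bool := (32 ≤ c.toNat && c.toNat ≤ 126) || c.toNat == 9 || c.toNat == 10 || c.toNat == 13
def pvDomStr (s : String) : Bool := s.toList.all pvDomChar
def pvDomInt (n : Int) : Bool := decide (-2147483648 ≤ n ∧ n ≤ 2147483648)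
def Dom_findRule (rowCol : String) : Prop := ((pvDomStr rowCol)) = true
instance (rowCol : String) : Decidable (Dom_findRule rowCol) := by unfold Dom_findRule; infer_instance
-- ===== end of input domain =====

-- B replaces A's stateful streak accumulator by split-on-'0' + count-'1's per segment (faster by a constant factor as measured).

-- ===== PORT A =====
-- one iteration of A's for-loop: state = (streak, pattern)
def findRuleStep (s : Int × String) (i : Char) : Int × String :=
  let streak := if i == '1' then s.1 + 1 else s.1
  if i == '0' && decide (0 < streak) then (0, s.2 ++ PySem.Int.toStr streak)
  else (streak, s.2)

def findRule (rowCol : String) : String :=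
  let st := rowCol.toList.foldl findRuleStep ((0 : Int), "")
  let pattern := if 0 < st.1 then st.2 ++ PySem.Int.toStr st.1 else st.2
  if pattern = "" then pattern ++ "0" else pattern

-- ===== PORT B =====
def findRule_alt (rowCol : String) : String :=
  let counts : List Int :=
    (PySem.Chars.splitOn rowCol.toList "0".toList).map
      (fun seg => (PySem.Chars.count seg "1".toList : Int))
  let pattern := PySem.Str.join "" ((counts.filter (fun c => decide (0 < c))).map PySem.Int.toStr)
  if pattern = "" then "0" else pattern

-- ===== PRECONDITION & SPEC =====
def Spec_findRule (rowCol : String) (out : String) : Prop := out = findRule_alt rowCol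
instance (rowCol : String) (out : String) : Decidable (Spec_findRule rowCol out) := by unfold Spec_findRule; infer_instance

-- ===== CLAIM (what is proved, stated in full; the proofs are below) =====
def Claim_equal_findRule : Prop := ∀ (rowCol : String), Dom_findRule rowCol → Spec_findRule rowCol (findRule rowCol)

-- ===== LEMMAS AND PROOFS =====



-- proof-side helpers: a structural description of the run-length computation
def emitZ (k : Nat) : List Char := if 0 < k then PySem.Int.toChars (k : Int) else []

def coreZ : Nat → List Char → List Char
  | k, [] => emitZ k
  | k, c :: rest =>
      if c = '1' then coreZ (k + 1) rest
      else if c = '0' then emitZ k ++ coreZ 0 rest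
      else coreZ k rest

def splitZ : List Char → List Char × List (List Char)
  | [] => ([], [])
  | c :: rest =>
      if c = '0' then ([], (splitZ rest).1 :: (splitZ rest).2)
      else (c :: (splitZ rest).1, (splitZ rest).2)

def renderZ (segs : List (List Char)) : List Char :=
  segs.foldr (fun seg acc => emitZ (seg.count '1') ++ acc) []

theorem countGo_single (c : Char) :
    ∀ (fuel : Nat) (l : List Char) (acc : Nat), l.length ≤ fuel →
      PySem.Chars.count.go [c] fuel l acc = acc + l.count c := by
  intro fuel
  induction fuel with
  | zero =>
      intro l acc h
      have : l = [] := by cases l <;> simp_all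
      subst this; simp [PySem.Chars.count.go]
  | succ n ih =>
      intro l acc h
      cases l with
      | nil => simp [PySem.Chars.count.go]
      | cons x rest =>
          simp only [PySem.Chars.count.go, List.isPrefixOf]
          by_cases hx : c = x
          · subst hx
            simp only [BEq.rfl, Bool.true_and, List.isPrefixOf, if_pos]
            rw [ih _ _ (by simpa using Nat.le_of_succ_le_succ h)]
            simp [List.count_cons]
            omega
          · have hb : (c == x) = false := by simp [hx]
            simp only [hb, Bool.false_and, if_neg Bool.false_ne_true]
            rw [ih _ _ (by simpa using Nat.le_of_succ_le_succ h)]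
            simp [List.count_cons, Ne.symm hx]
  done

theorem count_single (l : List Char) (c : Char) :
    PySem.Chars.count l [c] = l.count c := by
  simp [PySem.Chars.count, countGo_single c l.length l 0 le_rfl]

theorem splitGo_zero :
    ∀ (fuel : Nat) (l cur : List Char) (acc : List (List Char)), l.length ≤ fuel →
      PySem.Chars.splitOn.go ['0'] fuel l cur acc =
        acc.reverse ++ (cur.reverse ++ (splitZ l).1) :: (splitZ l).2 := by
  intro fuel
  induction fuel with
  | zero =>
      intro l cur acc h
      have : l = [] := by cases l <;> simp_all
      subst this; simp [PySem.Chars.splitOn.go, splitZ]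
  | succ n ih =>
      intro l cur acc h
      cases l with
      | nil => simp [PySem.Chars.splitOn.go, splitZ]
      | cons x rest =>
          simp only [PySem.Chars.splitOn.go, List.isPrefixOf]
          by_cases hx : x = '0'
          · subst hx
            simp only [BEq.rfl, Bool.true_and, List.isPrefixOf, if_pos]
            rw [ih _ _ _ (by simpa using Nat.le_of_succ_le_succ h)]
            simp [splitZ]
          · have hb : ('0' == x) = false := by simp [Ne.symm hx]
            simp only [hb, Bool.false_and, if_neg Bool.false_ne_true]
            rw [ih _ _ _ (by simpa using Nat.le_of_succ_le_succ h)]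
            simp [splitZ, hx]

theorem splitOn_zero (l : List Char) :
    PySem.Chars.splitOn l ['0'] = (splitZ l).1 :: (splitZ l).2 := by
  have := splitGo_zero (l.length + 1) l [] [] (Nat.le_succ _)
  simpa [PySem.Chars.splitOn] using this

theorem coreZ_splitZ : ∀ (cs : List Char) (k : Nat),
    coreZ k cs = emitZ (k + (splitZ cs).1.count '1') ++ renderZ (splitZ cs).2 := by
  intro cs
  induction cs with
  | nil => intro k; simp [coreZ, splitZ, renderZ]
  | cons c rest ih =>
      intro k
      by_cases h1 : c = '1'
      · subst h1
        have hne : ¬ ('1':Char) = '0' := by decide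
        simp only [coreZ, if_pos rfl, splitZ, if_neg hne]
        rw [ih (k + 1)]
        simp [List.count_cons]
        ring_nf
      · by_cases h0 : c = '0'
        · subst h0
          have hne : ¬ ('0':Char) = '1' := by decide
          simp only [coreZ, splitZ, if_neg hne, if_pos rfl]
          rw [ih 0]
          simp [renderZ]
        · simp only [coreZ, if_neg h1, if_neg h0, splitZ, if_neg h0]
          rw [ih k]
          simp [List.count_cons, h1]

theorem stepA_one (s : Int × String) : findRuleStep s '1' = (s.1 + 1, s.2) := by
  simp [findRuleStep]

theorem stepA_zero_pos (s : Int × String) (h : 0 < s.1) :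
    findRuleStep s '0' = (0, s.2 ++ PySem.Int.toStr s.1) := by
  simp [findRuleStep, h]

theorem stepA_zero_nonpos (s : Int × String) (h : ¬ 0 < s.1) :
    findRuleStep s '0' = (s.1, s.2) := by
  simp [findRuleStep, h]

theorem stepA_other (s : Int × String) (c : Char) (h1 : ¬ c = '1') (h0 : ¬ c = '0') :
    findRuleStep s c = (s.1, s.2) := by
  simp [findRuleStep, h1, h0]

theorem loopA (cs : List Char) : ∀ (k : Nat) (p : String),
    (let st := cs.foldl findRuleStep ((k : Int), p);
      if 0 < st.1 then st.2 ++ PySem.Int.toStr st.1 else st.2) =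
      p ++ String.ofList (coreZ k cs) := by
  induction cs with
  | nil =>
      intro k p
      by_cases hk : 0 < k
      · simp [coreZ, emitZ, hk, PySem.Int.toStr]
      · simp [coreZ, emitZ, hk]
  | cons c rest ih =>
      intro k p
      by_cases h1 : c = '1'
      · subst h1
        have hc : ((k : Int) + 1) = ((k + 1 : Nat) : Int) := by push_cast; ring
        rw [List.foldl_cons, stepA_one, hc, ih (k + 1) p,
          show coreZ k ('1' :: rest) = coreZ (k + 1) rest by simp [coreZ]]
      · by_cases h0 : c = '0'
        · subst h0
          have hcz : coreZ k ('0' :: rest) = emitZ k ++ coreZ 0 rest := by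
            simp [coreZ]
          by_cases hk : 0 < k
          · have hki : (0 : Int) < (k : Int) := by exact_mod_cast hk
            rw [List.foldl_cons, stepA_zero_pos _ hki,
              show ((0:Int), p ++ PySem.Int.toStr (k:Int)) =
                (((0:Nat):Int), p ++ PySem.Int.toStr (k:Int)) by norm_num,
              ih 0 (p ++ PySem.Int.toStr (k : Int)), hcz]
            apply String.ext
            simp [emitZ, hk, PySem.Int.toStr]
          · have hki : ¬ ((0 : Int) < (k : Int)) := by exact_mod_cast hk
            rw [List.foldl_cons, stepA_zero_nonpos _ hki, ih k p, hcz]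
            have hkz : k = 0 := by omega
            subst hkz
            simp [emitZ]
        · rw [List.foldl_cons, stepA_other _ c h1 h0, ih k p,
            show coreZ k (c :: rest) = coreZ k rest by simp only [coreZ, if_neg h1, if_neg h0]]

theorem joinNil_flatten : ∀ (ps : List (List Char)), PySem.Chars.join [] ps = ps.flatten := by
  intro ps
  induction ps with
  | nil => simp [PySem.Chars.join_nil]
  | cons p rest ih =>
      cases rest with
      | nil => simp [PySem.Chars.join_singleton]
      | cons q t => rw [PySem.Chars.join_cons_cons]; simp_all

theorem flatten_renderZ : ∀ (segs : List (List Char)),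
    (List.map (String.toList ∘ PySem.Int.toStr)
      (List.filter (fun c => decide (0 < c))
        (segs.map (fun seg => (seg.count '1' : Int))))).flatten = renderZ segs := by
  intro segs
  induction segs with
  | nil => simp [renderZ]
  | cons s t ih =>
      simp only [List.map_cons, List.filter_cons]
      rw [show renderZ (s :: t) = emitZ (s.count '1') ++ renderZ t from rfl]
      by_cases hn : 0 < s.count '1'
      · have hi : (0 : Int) < (s.count '1' : Int) := by exact_mod_cast hn
        rw [if_pos (decide_eq_true hi), List.map_cons, List.flatten_cons, ih]
        rw [show emitZ (s.count '1') = PySem.Int.toChars ((s.count '1' : Nat) : Int) from by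
          unfold emitZ; rw [if_pos hn]]
        rw [show (String.toList ∘ PySem.Int.toStr) ((s.count '1' : Nat) : Int) =
          PySem.Int.toChars ((s.count '1' : Nat) : Int) from by
          simp [PySem.Int.toStr]]
      · have hi : ¬ ((0 : Int) < (s.count '1' : Int)) := by exact_mod_cast hn
        rw [if_neg (by simpa using hi), ih]
        rw [show emitZ (s.count '1') = [] from by unfold emitZ; rw [if_neg hn]]
        simp

theorem join_renderZ : ∀ (segs : List (List Char)),
    (PySem.Str.join ""
        (((segs.map (fun seg => (PySem.Chars.count seg "1".toList : Int))).filter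
            (fun c => decide (0 < c))).map PySem.Int.toStr)).toList = renderZ segs := by
  intro segs
  simp only [PySem.Str.join, String.toList_ofList,
    show ("".toList : List Char) = [] from rfl,
    show ("1".toList : List Char) = ['1'] from rfl, joinNil_flatten, count_single, List.map_map]
  exact flatten_renderZ segs

-- ===== VERDICT (by name: the statement is the Claim_ definition above) =====
theorem findRule_spec : Claim_equal_findRule := by
  intro rowCol _
  simp only [Spec_findRule, findRule, findRule_alt]
  have hA := loopA rowCol.toList 0 ""
  simp only [Nat.cast_zero] at hA
  rw [hA]
  have hEmpty : ∀ l : List Char, ("" ++ String.ofList l) = String.ofList l := by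
    intro l; apply String.ext; simp
  rw [hEmpty]
  have hcore : coreZ 0 rowCol.toList =
      renderZ ((splitZ rowCol.toList).1 :: (splitZ rowCol.toList).2) := by
    rw [coreZ_splitZ]; simp [renderZ]
  have hB := join_renderZ ((splitZ rowCol.toList).1 :: (splitZ rowCol.toList).2)
  rw [show ("0".toList : List Char) = ['0'] from rfl, splitOn_zero]
  set segs := (splitZ rowCol.toList).1 :: (splitZ rowCol.toList).2 with hsegs
  set pat := PySem.Str.join ""
      (((segs.map (fun seg => (PySem.Chars.count seg "1".toList : Int))).filter
          (fun c => decide (0 < c))).map PySem.Int.toStr) with hpat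
  have hBA : String.ofList (coreZ 0 rowCol.toList) = pat := by
    apply String.ext; rw [hB, ← hcore]; simp
  rw [hcore] at hBA ⊢
  rw [show String.ofList (renderZ segs) = pat from hBA]
  by_cases hz : pat = ""
  · rw [if_pos hz, if_pos hz, hz]
    apply String.ext; simp
  · rw [if_neg hz, if_neg hz]
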